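-- pv_equiv track=rewrite | github.com/pedroandreou/MyAgentRanSackGUI | src/get_lines.py | get_lines_with_no_pattern
-- ===== SOURCE A (Python) =====
-- def get_lines_with_no_pattern(lines, text, case_insesitive=False):
--
--     new_list = []
--     counter = 0
--
--     if case_insesitive == True:
--         for line in lines:
--             counter += 1
--
--             for i in line.lower().split():
--                  if i == text.lower():
--                     new_list.append(f"Line {counter}: {line}")
--     else:
--         for line in lines:
--             counter += 1
--
--             for i in line.split():
--                  if i == text:
--                     new_list.append(f"Line {counter}: {line}")
--
--     return new_list
-- ===== SOURCE B (Python) =====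
-- def get_lines_with_no_pattern(lines, text, case_insesitive=False):
--     # Build an inverted index word -> occurrences (line number, line), then look the target up.
--     index = {}
--     for n, line in enumerate(lines, 1):
--         source = line.lower() if case_insesitive == True else line
--         for w in source.split():
--             index.setdefault(w, []).append((n, line))
--     target = text.lower() if case_insesitive == True else text
--     return [f"Line {n}: {line}" for n, line in index.get(target, [])]
-- ===== Notes on version B (the rewrite author's own statement) =====
-- stated objective: alternative
-- what changed: Instead of comparing every word against the target inside the scan, B builds an inverted index mapping each word to its (line number, line) occurrences in one pass and then emits the tagged lines for the single bucket index.get(target, []).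
import Mathlib
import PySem

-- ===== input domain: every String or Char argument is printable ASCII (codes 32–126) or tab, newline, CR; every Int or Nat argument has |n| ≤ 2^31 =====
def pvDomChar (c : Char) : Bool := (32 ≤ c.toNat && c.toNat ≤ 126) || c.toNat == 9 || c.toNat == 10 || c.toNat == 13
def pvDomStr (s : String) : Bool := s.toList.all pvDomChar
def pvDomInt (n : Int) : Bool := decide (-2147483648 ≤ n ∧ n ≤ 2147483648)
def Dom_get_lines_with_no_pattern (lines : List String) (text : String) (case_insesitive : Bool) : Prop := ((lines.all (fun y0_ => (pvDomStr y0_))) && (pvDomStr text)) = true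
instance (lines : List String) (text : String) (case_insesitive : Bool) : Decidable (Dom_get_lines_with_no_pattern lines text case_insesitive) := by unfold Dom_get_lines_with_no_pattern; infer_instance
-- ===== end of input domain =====

-- B replaces A's per-word target comparison with an inverted index (word -> occurrences) built
-- in one pass and a single lookup of the target's bucket (alternative data structure, same cost).


-- ===== PORT A =====
def get_lines_with_no_pattern (lines : List String) (text : String) (case_insesitive : Bool) : List String :=
  if case_insesitive == true then
    (lines.foldl (fun (st : List String × Int) line =>
      let counter := st.2 + 1
      let new_list := (PySem.Str.split₀ (PySem.Str.lower line)).foldl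
        (fun nl i => if i == PySem.Str.lower text
                     then nl ++ ["Line " ++ PySem.Int.toStr counter ++ ": " ++ line] else nl) st.1
      (new_list, counter)) ([], 0)).1
  else
    (lines.foldl (fun (st : List String × Int) line =>
      let counter := st.2 + 1
      let new_list := (PySem.Str.split₀ line).foldl
        (fun nl i => if i == text
                     then nl ++ ["Line " ++ PySem.Int.toStr counter ++ ": " ++ line] else nl) st.1
      (new_list, counter)) ([], 0)).1

-- ===== PORT B =====
def get_lines_with_no_pattern_alt (lines : List String) (text : String) (case_insesitive : Bool) : List String :=
  let index := (PySem.List.enumerate lines 1).foldl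
    (fun (index : PySem.Dict String (List (Int × String))) p =>
      let source := if case_insesitive == true then PySem.Str.lower p.2 else p.2
      (PySem.Str.split₀ source).foldl
        (fun d w => d.modify w [] (fun occs => occs ++ [(p.1, p.2)])) index)
    PySem.Dict.empty
  let target := if case_insesitive == true then PySem.Str.lower text else text
  (index.getD target []).map (fun q => "Line " ++ PySem.Int.toStr q.1 ++ ": " ++ q.2)

-- ===== PRECONDITION & SPEC =====
def Spec_get_lines_with_no_pattern (lines : List String) (text : String) (case_insesitive : Bool) (out : List String) : Prop := out = get_lines_with_no_pattern_alt lines text case_insesitive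
instance (lines : List String) (text : String) (case_insesitive : Bool) (out : List String) : Decidable (Spec_get_lines_with_no_pattern lines text case_insesitive out) := by unfold Spec_get_lines_with_no_pattern; infer_instance

-- ===== CLAIM (what is proved, stated in full; the proofs are below) =====
def Claim_equal_get_lines_with_no_pattern : Prop := ∀ (lines : List String) (text : String) (case_insesitive : Bool), Dom_get_lines_with_no_pattern lines text case_insesitive → Spec_get_lines_with_no_pattern lines text case_insesitive (get_lines_with_no_pattern lines text case_insesitive)

-- ===== LEMMAS AND PROOFS =====

-- A's inner per-word loop: each word equal to t appends the same tag.
theorem inner_loop_eq_replicate (words : List String) (t item : String) (acc : List String) :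
    words.foldl (fun nl i => if i == t then nl ++ [item] else nl) acc
      = acc ++ List.replicate (words.count t) item := by
  rw [PySem.List.foldl_append_if (fun i => i == t) (fun _ => item) words acc]
  simp [List.map_const', List.count, List.countP_eq_length_filter]

-- A's outer loop equals the flattened per-line replicated tags over the enumerated lines.
theorem a_loop_eq (w : String → List String) (t : String) :
    ∀ (lines : List String) (c : Int) (acc : List String),
    (lines.foldl (fun (st : List String × Int) line =>
        ((w line).foldl (fun nl i =>
            if i == t then nl ++ ["Line " ++ PySem.Int.toStr (st.2 + 1) ++ ": " ++ line] else nl) st.1,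
         st.2 + 1)) (acc, c)).1
      = acc ++ (PySem.List.enumerate lines (c + 1)).flatMap
          (fun p => List.replicate ((w p.2).count t) ("Line " ++ PySem.Int.toStr p.1 ++ ": " ++ p.2)) := by
  intro lines
  induction lines with
  | nil => intro c acc; simp [PySem.List.enumerate]
  | cons x xs ih =>
      intro c acc
      rw [PySem.List.enumerate_cons]
      simp only [List.foldl_cons, List.flatMap_cons]
      rw [inner_loop_eq_replicate (w x) t _ acc, ih (c + 1), List.append_assoc]

-- One line's words folded into the index grow the t-bucket by count-many copies of p.
theorem bucket_line (words : List String) (t : String) (p : Int × String)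
    (d : PySem.Dict String (List (Int × String))) :
    (words.foldl (fun d w => d.modify w [] (fun occs => occs ++ [p])) d).getD t []
      = d.getD t [] ++ List.replicate (words.count t) p := by
  have h := PySem.Dict.getD_foldl_modify_append (l := words.map (fun w => (w, p))) (d := d) (c := t)
  rw [List.foldl_map] at h
  rw [h]
  congr 1
  clear h
  induction words with
  | nil => simp
  | cons a ws ih =>
      simp only [List.map_cons, List.filter_cons, List.count_cons]
      by_cases hat : (a == t) = true
      · simp [hat, ih, List.replicate_succ]
      · simp [hat, ih]

-- B's index-building loop: the t-bucket collects the occurrences of t in enumerate order.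
theorem b_loop_eq (w : String → List String) (t : String) :
    ∀ (ps : List (Int × String)) (d : PySem.Dict String (List (Int × String))),
    ((ps.foldl (fun d p => (w p.2).foldl
        (fun d' w' => d'.modify w' [] (fun occs => occs ++ [(p.1, p.2)])) d) d).getD t [])
      = d.getD t [] ++ ps.flatMap (fun p => List.replicate ((w p.2).count t) p) := by
  intro ps
  induction ps with
  | nil => intro d; simp
  | cons p ps ih =>
      intro d
      simp only [List.foldl_cons, List.flatMap_cons]
      rw [ih, bucket_line (w p.2) t (p.1, p.2) d, List.append_assoc]

-- Both sides reduce to the same flattened occurrence list (for either branch's word function).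
theorem both_eq (w : String → List String) (t : String) (lines : List String) :
    (lines.foldl (fun (st : List String × Int) line =>
        ((w line).foldl (fun nl i =>
            if i == t then nl ++ ["Line " ++ PySem.Int.toStr (st.2 + 1) ++ ": " ++ line] else nl) st.1,
         st.2 + 1)) ([], 0)).1
      = (((PySem.List.enumerate lines 1).foldl (fun d p => (w p.2).foldl
            (fun d' w' => d'.modify w' [] (fun occs => occs ++ [(p.1, p.2)])) d)
          PySem.Dict.empty).getD t []).map
          (fun q => "Line " ++ PySem.Int.toStr q.1 ++ ": " ++ q.2) := by
  rw [a_loop_eq w t lines 0 [], b_loop_eq w t (PySem.List.enumerate lines 1) PySem.Dict.empty]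
  simp [List.map_flatMap]

-- ===== VERDICT (by name: the statement is the Claim_ definition above) =====
theorem get_lines_with_no_pattern_spec : Claim_equal_get_lines_with_no_pattern := by
  intro lines text ci _
  unfold Spec_get_lines_with_no_pattern get_lines_with_no_pattern get_lines_with_no_pattern_alt
  cases ci with
  | true =>
      simp only [beq_self_eq_true, if_pos]
      exact both_eq (fun l => PySem.Str.split₀ (PySem.Str.lower l)) (PySem.Str.lower text) lines
  | false =>
      simp only [show (false == true) = false from rfl, Bool.false_eq_true, if_neg, not_false_iff]
      exact both_eq (fun l => PySem.Str.split₀ l) text lines
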